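-- pv_equiv track=rewrite | github.com/mdaudsheikh/Arcade_Universe | Smooth Sailing/solution.py | solution
-- ===== SOURCE A (Python) =====
-- def solution(s1, s2):
--     sum = 0
--     def letter_occurances(string):
--         letter_dict = dict()
--         for letter in string:
--             letter_dict[letter] = 0
--         for letter in string:
--             letter_dict[letter] += 1
--         return letter_dict
--
--     s1_letters = letter_occurances(s1)
--     s2_letters = letter_occurances(s2)
--
--     if(len(s1_letters) < len(s2_letters)):
--         for letter in s1_letters:
--             if(letter in s2_letters):
--                 if(s1_letters[letter] < s2_letters[letter]):
--                     sum += s1_letters[letter]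
--                 else:
--                     sum += s2_letters[letter]
--     else:
--         for letter in s2_letters:
--             if(letter in s1_letters):
--                 if(s1_letters[letter] < s2_letters[letter]):
--                     sum += s1_letters[letter]
--                 else:
--                     sum += s2_letters[letter]
--     return sum
-- ===== SOURCE B (Python) =====
-- def solution(s1, s2):
--     a = sorted(s1)
--     b = sorted(s2)
--     i = j = total = 0
--     while i < len(a) and j < len(b):
--         if a[i] < b[j]:
--             i += 1
--         elif b[j] < a[i]:
--             j += 1
--         else:
--             total += 1
--             i += 1
--             j += 1
--     return total
-- ===== Notes on version B (the rewrite author's own statement) =====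
-- stated objective: alternative
-- what changed: B sorts both character lists and counts matches in one two-pointer merge pass, instead of building two frequency dicts and summing min counts over the smaller dict's keys.
import Mathlib
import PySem

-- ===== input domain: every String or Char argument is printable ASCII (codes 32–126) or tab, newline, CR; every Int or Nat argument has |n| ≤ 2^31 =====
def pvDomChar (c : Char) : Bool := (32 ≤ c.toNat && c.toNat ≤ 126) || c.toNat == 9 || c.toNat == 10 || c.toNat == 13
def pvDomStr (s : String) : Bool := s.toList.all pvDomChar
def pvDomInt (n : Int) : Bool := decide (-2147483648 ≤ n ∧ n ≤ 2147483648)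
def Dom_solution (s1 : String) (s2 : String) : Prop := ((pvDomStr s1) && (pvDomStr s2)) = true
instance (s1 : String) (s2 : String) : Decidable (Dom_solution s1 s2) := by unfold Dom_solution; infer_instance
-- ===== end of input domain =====

-- B replaces A's two frequency dicts and branch on the smaller one by a single two-pointer
-- merge over the two sorted character lists (objective: alternative algorithm, same result).

-- ===== PORT A =====
-- letter_occurances: first loop sets every key to 0, second loop increments
def letterOccurances (string : List Char) : PySem.Dict Char Int :=
  let letterDict := string.foldl (fun d letter => d.insert letter 0) PySem.Dict.empty
  string.foldl (fun d letter => d.modify letter 0 (· + 1)) letterDict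

def solution (s1 : String) (s2 : String) : Int :=
  let s1Letters := letterOccurances s1.toList
  let s2Letters := letterOccurances s2.toList
  if s1Letters.size < s2Letters.size then
    s1Letters.keys.foldl (fun sum letter =>
      if s2Letters.contains letter then
        if s1Letters.getD letter 0 < s2Letters.getD letter 0 then sum + s1Letters.getD letter 0
        else sum + s2Letters.getD letter 0
      else sum) 0
  else
    s2Letters.keys.foldl (fun sum letter =>
      if s1Letters.contains letter then
        if s1Letters.getD letter 0 < s2Letters.getD letter 0 then sum + s1Letters.getD letter 0
        else sum + s2Letters.getD letter 0
      else sum) 0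

-- ===== PORT B =====
-- the while loop of Source B: advance the pointer holding the smaller character,
-- both (counting one match) when they are equal
def mergeCount : List Char → List Char → Int
  | [], _ => 0
  | _ :: _, [] => 0
  | a :: as, b :: bs =>
    if a < b then mergeCount as (b :: bs)
    else if b < a then mergeCount (a :: as) bs
    else 1 + mergeCount as bs

def solution_alt (s1 : String) (s2 : String) : Int :=
  mergeCount (PySem.List.sorted s1.toList (fun x => x) false)
             (PySem.List.sorted s2.toList (fun x => x) false)

-- ===== PRECONDITION & SPEC =====
def Spec_solution (s1 : String) (s2 : String) (out : Int) : Prop := out = solution_alt s1 s2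
instance (s1 : String) (s2 : String) (out : Int) : Decidable (Spec_solution s1 s2 out) := by unfold Spec_solution; infer_instance

-- ===== CLAIM (what is proved, stated in full; the proofs are below) =====
def Claim_equal_solution : Prop := ∀ (s1 : String) (s2 : String), Dom_solution s1 s2 → Spec_solution s1 s2 (solution s1 s2)

-- ===== LEMMAS AND PROOFS =====

-- keys of letter_occurances = first occurrences (set) of the string's characters
theorem keys_letterOccurances (l : List Char) :
    (letterOccurances l).keys = PySem.Set.ofList l := by
  unfold letterOccurances
  rw [PySem.Dict.keys_foldl_modify, PySem.Dict.keys_foldl_insert]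
  simp only [PySem.Dict.keys_empty, PySem.Set.update_nil_left]
  rw [PySem.Set.update_eq_append_filter]
  have : (PySem.Set.ofList l).filter (fun y => !(PySem.Set.contains (PySem.Set.ofList l) y)) = [] := by
    apply List.filter_eq_nil_iff.mpr
    intro a ha
    rw [PySem.Set.mem_ofList] at ha
    simp [ha]
  rw [this, List.append_nil]

theorem getD_insert_fold (l : List Char) (d : PySem.Dict Char Int)
    (h : ∀ c, d.getD c 0 = 0) (c : Char) :
    (l.foldl (fun d x => d.insert x 0) d).getD c 0 = 0 := by
  induction l generalizing d with
  | nil => exact h c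
  | cons a as ih =>
    simp only [List.foldl_cons]
    apply ih
    intro c'
    rw [PySem.Dict.getD_insert]
    split_ifs
    · rfl
    · exact h c'

theorem getD_letterOccurances (l : List Char) (c : Char) :
    (letterOccurances l).getD c 0 = (l.count c : Int) := by
  unfold letterOccurances
  rw [PySem.Dict.getD_foldl_modify_add_one]
  rw [getD_insert_fold l PySem.Dict.empty (fun c => by simp [PySem.Dict.getD_empty])]
  simp

theorem contains_letterOccurances (l : List Char) (c : Char) :
    (letterOccurances l).contains c = true ↔ c ∈ l := by
  rw [PySem.Dict.contains_iff_mem_keys, keys_letterOccurances, PySem.Set.mem_ofList]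

-- the value of either branch of A: sum over the distinct letters of l of min(count in l1, count in l2)
theorem branch_eq_sum (l l1 l2 : List Char) :
    ((PySem.Set.ofList l).foldl (fun sum letter =>
      if (letterOccurances l2).contains letter then
        if (letterOccurances l1).getD letter 0 < (letterOccurances l2).getD letter 0 then
          sum + (letterOccurances l1).getD letter 0
        else sum + (letterOccurances l2).getD letter 0
      else sum) 0)
    = ∑ c ∈ l.toFinset, (min (l1.count c) (l2.count c) : Int) := by
  rw [PySem.List.foldl_congr_mem'
      (g := fun sum letter => sum + (if letter ∈ l2 then (min (l1.count letter) (l2.count letter) : Int) else 0))]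
  · rw [PySem.List.foldl_add]
    have hperm : (PySem.Set.ofList l).toFinset = l.toFinset := by
      apply Finset.ext; intro a; simp [PySem.Set.mem_ofList]
    rw [zero_add, ← List.sum_toFinset _ (PySem.Set.nodup_ofList l), hperm]
    apply Finset.sum_congr rfl
    intro c _
    by_cases h2 : c ∈ l2
    · simp [h2]
    · have : l2.count c = 0 := List.count_eq_zero.mpr h2
      simp [h2, this]
  · intro x hx acc
    rw [PySem.Set.mem_ofList] at hx
    by_cases h2 : x ∈ l2
    · rw [if_pos ((contains_letterOccurances l2 x).mpr h2), if_pos h2,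
        getD_letterOccurances, getD_letterOccurances]
      split_ifs with h <;> omega
    · rw [if_neg (by simpa using (fun hc => h2 ((contains_letterOccurances l2 x).mp hc))), if_neg h2,
        add_zero]


-- same, for the branch testing membership in the FIRST dict
theorem branch_eq_sum' (l l1 l2 : List Char) :
    ((PySem.Set.ofList l).foldl (fun sum letter =>
      if (letterOccurances l1).contains letter then
        if (letterOccurances l1).getD letter 0 < (letterOccurances l2).getD letter 0 then
          sum + (letterOccurances l1).getD letter 0
        else sum + (letterOccurances l2).getD letter 0
      else sum) 0)
    = ∑ c ∈ l.toFinset, (min (l1.count c) (l2.count c) : Int) := by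
  rw [PySem.List.foldl_congr_mem'
      (g := fun sum letter => sum + (if letter ∈ l1 then (min (l1.count letter) (l2.count letter) : Int) else 0))]
  · rw [PySem.List.foldl_add]
    have hperm : (PySem.Set.ofList l).toFinset = l.toFinset := by
      apply Finset.ext; intro a; simp [PySem.Set.mem_ofList]
    rw [zero_add, ← List.sum_toFinset _ (PySem.Set.nodup_ofList l), hperm]
    apply Finset.sum_congr rfl
    intro c _
    by_cases h1 : c ∈ l1
    · simp [h1]
    · have : l1.count c = 0 := List.count_eq_zero.mpr h1
      simp [h1, this]
  · intro x hx acc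
    by_cases h1 : x ∈ l1
    · rw [if_pos ((contains_letterOccurances l1 x).mpr h1), if_pos h1,
        getD_letterOccurances, getD_letterOccurances]
      split_ifs with h <;> omega
    · rw [if_neg (by simpa using (fun hc => h1 ((contains_letterOccurances l1 x).mp hc))), if_neg h1,
        add_zero]

-- the common value: |multiset intersection|
theorem sum_min_eq_card_inter (l1 l2 : List Char) :
    ∑ c ∈ l1.toFinset, (min (l1.count c) (l2.count c)) = ((l1 : Multiset Char) ∩ (l2 : Multiset Char)).card := by
  rw [← Multiset.toFinset_sum_count_eq ((l1 : Multiset Char) ∩ l2)]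
  rw [Finset.sum_subset (s₁ := ((l1 : Multiset Char) ∩ l2).toFinset) (s₂ := l1.toFinset)]
  · apply Finset.sum_congr rfl
    intro c _
    simp
  · intro c hc
    rw [Multiset.toFinset_inter] at hc
    have := Finset.mem_inter.mp hc
    simpa using this.1
  · intro c _ hc
    rw [Multiset.toFinset_inter] at hc
    simp only [Finset.mem_inter, not_and] at hc
    by_cases h1 : c ∈ l1.toFinset
    · have h2 : c ∉ l2.toFinset := by simpa using hc (by simpa using h1)
      have : l2.count c = 0 := List.count_eq_zero.mpr (by simpa using h2)
      simp [this]
    · have : l1.count c = 0 := List.count_eq_zero.mpr (by simpa using h1)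
      simp [this]

theorem inter_cons_of_not_mem {b : Char} (s : Multiset Char) (t : Multiset Char) (h : b ∉ s) :
    s ∩ (b ::ₘ t) = s ∩ t := by
  apply Multiset.ext.mpr
  intro c
  by_cases hc : c = b
  · subst hc
    simp [Multiset.count_inter, Multiset.count_eq_zero.mpr h]
  · simp [Multiset.count_inter, hc]

theorem mergeCount_eq_card_inter :
    ∀ (xs ys : List Char), xs.Pairwise (· ≤ ·) → ys.Pairwise (· ≤ ·) →
    mergeCount xs ys = (((xs : Multiset Char) ∩ (ys : Multiset Char)).card : Int) := by
  intro xs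
  induction xs with
  | nil => intro ys _ _; simp [mergeCount]
  | cons a as ihx =>
    intro ys
    induction ys with
    | nil => intro _ _; simp [mergeCount]
    | cons b bs ihy =>
      intro hx0 hy0
      have hx := List.pairwise_cons.mp hx0
      have hy := List.pairwise_cons.mp hy0
      by_cases hab : a < b
      · have hnot : a ∉ (b :: bs : List Char) := by
          intro hmem
          rcases List.mem_cons.mp hmem with h | h
          · exact absurd h (ne_of_lt hab)
          · exact absurd (lt_of_lt_of_le hab (hy.1 a h)) (lt_irrefl a)
        rw [show mergeCount (a :: as) (b :: bs) = mergeCount as (b :: bs) by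
              simp [mergeCount, hab]]
        rw [ihx (b :: bs) hx.2 hy0]
        rw [show ((a :: as : List Char) : Multiset Char) = a ::ₘ (as : Multiset Char) from rfl,
          Multiset.cons_inter_of_neg _ (by simpa using hnot)]
      · by_cases hba : b < a
        · have hnot : b ∉ (a :: as : List Char) := by
            intro hmem
            rcases List.mem_cons.mp hmem with h | h
            · exact absurd h (ne_of_lt hba)
            · exact absurd (lt_of_lt_of_le hba (hx.1 b h)) (lt_irrefl b)
          rw [show mergeCount (a :: as) (b :: bs) = mergeCount (a :: as) bs by
                simp [mergeCount, hab, hba]]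
          rw [ihy hx0 hy.2, show ((b :: bs : List Char) : Multiset Char) = b ::ₘ (bs : Multiset Char) from rfl,
            inter_cons_of_not_mem _ _ (by simpa using hnot)]
        · have heq : a = b := le_antisymm (le_of_not_gt hba) (le_of_not_gt hab)
          subst heq
          rw [show mergeCount (a :: as) (a :: bs) = 1 + mergeCount as bs by
                simp [mergeCount]]
          rw [ihx bs hx.2 hy.2]
          rw [show ((a :: as : List Char) : Multiset Char) = a ::ₘ (as : Multiset Char) from rfl,
            show ((a :: bs : List Char) : Multiset Char) = a ::ₘ (bs : Multiset Char) from rfl,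
            Multiset.cons_inter_of_pos _ (Multiset.mem_cons_self a _)]
          simp
          omega

-- ===== VERDICT (by name: the statement is the Claim_ definition above) =====
theorem solution_spec : Claim_equal_solution := by
  intro s1 s2 _
  unfold Spec_solution solution solution_alt
  have hB : mergeCount (PySem.List.sorted s1.toList (fun x => x) false)
      (PySem.List.sorted s2.toList (fun x => x) false)
      = (((s1.toList : Multiset Char) ∩ (s2.toList : Multiset Char)).card : Int) := by
    rw [mergeCount_eq_card_inter _ _
        (by simpa using PySem.List.sorted_pairwise s1.toList (fun x => x))
        (by simpa using PySem.List.sorted_pairwise s2.toList (fun x => x))]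
    congr 1
    · exact congrArg Multiset.card (congrArg₂ (· ∩ ·)
        (Quot.sound (PySem.List.sorted_perm s1.toList (fun x => x) false))
        (Quot.sound (PySem.List.sorted_perm s2.toList (fun x => x) false)))
  rw [hB]
  dsimp only
  split_ifs with hsize
  · rw [keys_letterOccurances, branch_eq_sum s1.toList s1.toList s2.toList]
    rw [show (∑ c ∈ s1.toList.toFinset, (min (s1.toList.count c) (s2.toList.count c) : Int))
        = ((∑ c ∈ s1.toList.toFinset, min (s1.toList.count c) (s2.toList.count c) : ℕ) : Int) by
          push_cast; rfl]
    rw [sum_min_eq_card_inter]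
  · rw [keys_letterOccurances, branch_eq_sum' s2.toList s1.toList s2.toList]
    rw [show (∑ c ∈ s2.toList.toFinset, (min (s1.toList.count c) (s2.toList.count c) : Int))
        = ((∑ c ∈ s2.toList.toFinset, min (s2.toList.count c) (s1.toList.count c) : ℕ) : Int) by
          push_cast; simp [min_comm]]
    rw [sum_min_eq_card_inter s2.toList s1.toList]
    congr 1
    exact congrArg Multiset.card (Multiset.ext.mpr (fun c => by
      simp [min_comm]))
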